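-- pv_equiv track=rewrite | github.com/PiotrMD/Tutorial | app.py | trend_label
-- ===== SOURCE A (Python) =====
-- def trend_label(values):
--     vals = [v for v in values if v is not None]
--     if len(vals) < 2:
--         return "za mało danych"
--     if vals[-1] > vals[0]:
--         return "trend wzrostowy"
--     if vals[-1] < vals[0]:
--         return "trend spadkowy"
--     return "bez wyraźnej zmiany"
-- ===== SOURCE B (Python) =====
-- def trend_label(values):
--     # two-ended scan with early exit: find the first non-None from the front,
--     # then the last non-None among the remaining elements scanning from the back;
--     # label via a sign-indexed tuple (Python's -1 wraps to the last entry).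
--     rest = None
--     for k, v in enumerate(values):
--         if v is not None:
--             first, rest = v, values[k + 1:]
--             break
--     if rest is None:
--         return "za mało danych"
--     for w in reversed(rest):
--         if w is not None:
--             d = w - first
--             return ("bez wyraźnej zmiany", "trend wzrostowy", "trend spadkowy")[(d > 0) - (d < 0)]
--     return "za mało danych"
-- ===== Notes on version B (the rewrite author's own statement) =====
-- stated objective: alternative
-- what changed: B never builds the filtered list: it scans from the front for the first non-None, then scans only the remaining suffix from the back for the last non-None, and picks the label from a sign-indexed tuple instead of a comparison branch chain.
import Mathlib
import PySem

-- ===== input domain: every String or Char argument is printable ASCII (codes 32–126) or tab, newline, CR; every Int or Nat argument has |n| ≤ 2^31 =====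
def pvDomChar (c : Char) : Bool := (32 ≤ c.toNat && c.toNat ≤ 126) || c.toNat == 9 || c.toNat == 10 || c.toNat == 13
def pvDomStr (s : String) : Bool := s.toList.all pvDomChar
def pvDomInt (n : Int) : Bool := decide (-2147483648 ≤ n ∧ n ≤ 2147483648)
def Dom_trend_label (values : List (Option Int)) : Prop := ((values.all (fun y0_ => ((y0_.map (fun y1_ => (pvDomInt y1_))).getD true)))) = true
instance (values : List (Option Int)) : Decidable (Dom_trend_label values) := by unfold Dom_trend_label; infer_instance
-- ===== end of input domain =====

-- ===== PORT A =====
def trend_label (values : List (Option Int)) : String :=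
  let vals := values.filterMap id
  if vals.length < 2 then "za mało danych"
  else
    match PySem.List.pyGet? vals (-1), PySem.List.pyGet? vals 0 with
    | some last, some first =>
        if last > first then "trend wzrostowy"
        else if last < first then "trend spadkowy"
        else "bez wyraźnej zmiany"
    | _, _ => "za mało danych"   -- unreachable: vals has length ≥ 2, both indices in range

-- ===== PORT B =====
-- B: two-ended scan, no filtered list — first non-None from the front (with the
-- remaining suffix), last non-None of that suffix from the back, label picked
-- from a sign-indexed tuple (Python index -1 wraps to the last entry).

-- forward loop: first non-None value together with values[k+1:]
def findFirst : List (Option Int) → Option (Int × List (Option Int))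
  | [] => none
  | none :: _t => findFirst _t
  | some x :: t => some (x, t)

-- backward loop body: first non-None of the (already reversed) list
def firstSome : List (Option Int) → Option Int
  | [] => none
  | none :: _t => firstSome _t
  | some x :: t => some x

def trend_label_alt (values : List (Option Int)) : String :=
  match findFirst values with
  | none => "za mało danych"
  | some (first, rest) =>
    match firstSome rest.reverse with
    | none => "za mało danych"
    | some w =>
        let d := w - first
        (PySem.List.pyGet? ["bez wyraźnej zmiany", "trend wzrostowy", "trend spadkowy"]
            ((if d > 0 then (1 : Int) else 0) - (if d < 0 then 1 else 0))).getD "za mało danych"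

-- ===== PRECONDITION & SPEC =====
def Spec_trend_label (values : List (Option Int)) (out : String) : Prop := out = trend_label_alt values
instance (values : List (Option Int)) (out : String) : Decidable (Spec_trend_label values out) := by unfold Spec_trend_label; infer_instance

-- ===== CLAIM (what is proved, stated in full; the proofs are below) =====
def Claim_equal_trend_label : Prop := ∀ (values : List (Option Int)), Dom_trend_label values → Spec_trend_label values (trend_label values)

-- ===== LEMMAS AND PROOFS =====

lemma findFirst_none : ∀ (l : List (Option Int)), findFirst l = none → l.filterMap id = [] := by
  intro l
  induction l with
  | nil => intro _; rfl
  | cons v t ih =>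
    cases v with
    | none => intro h; simpa using ih (by simpa [findFirst] using h)
    | some x => intro h; simp [findFirst] at h

lemma findFirst_some : ∀ (l : List (Option Int)) (x : Int) (rest : List (Option Int)),
    findFirst l = some (x, rest) → l.filterMap id = x :: rest.filterMap id := by
  intro l
  induction l with
  | nil => intro x rest h; simp [findFirst] at h
  | cons v t ih =>
    cases v with
    | none => intro x rest h; simpa using ih x rest (by simpa [findFirst] using h)
    | some y =>
      intro x rest h
      simp [findFirst] at h
      simp [h.1, h.2]

lemma firstSome_eq_head? : ∀ (l : List (Option Int)), firstSome l = (l.filterMap id).head? := by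
  intro l
  induction l with
  | nil => rfl
  | cons v t ih =>
    cases v with
    | none => simp only [firstSome]; exact ih
    | some x => rfl

lemma firstSome_reverse (l : List (Option Int)) :
    firstSome l.reverse = (l.filterMap id).getLast? := by
  rw [firstSome_eq_head?, List.filterMap_reverse, List.head?_reverse]

theorem trend_label_spec : Claim_equal_trend_label := by
  intro values _
  unfold Spec_trend_label trend_label trend_label_alt
  cases h : findFirst values with
  | none => rw [findFirst_none values h]; simp
  | some p =>
    obtain ⟨first, rest⟩ := p
    have hfm := findFirst_some values first rest h
    rw [hfm]
    cases h2 : firstSome rest.reverse with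
    | none =>
      have hnil : rest.filterMap id = [] := by
        have hg := firstSome_reverse rest
        rw [h2] at hg
        cases hr : rest.filterMap id with
        | nil => rfl
        | cons a u => rw [hr] at hg; exact absurd (List.getLast?_eq_none_iff.mp hg.symm) (List.cons_ne_nil a u)
      rw [hnil]
      simp [h2]
    | some w =>
      have hlast : (rest.filterMap id).getLast? = some w := by
        rw [← firstSome_reverse, h2]
      cases hr : rest.filterMap id with
      | nil => rw [hr] at hlast; simp at hlast
      | cons a u =>
        rw [hr] at hlast
        have hlen : ¬ ((first :: a :: u).length < 2) := by simp
        simp only [hlen, if_false, PySem.List.pyGet?_neg_one, PySem.List.pyGet?_zero_cons,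
          List.getLast?_cons_cons, hlast, h2]
        rcases lt_trichotomy w first with hlt | heq | hgt
        · have h1 : ¬ (first < w) := by omega
          norm_num [hlt, h1]
          decide
        · subst heq
          norm_num
        · have h1 : ¬ (w < first) := by omega
          norm_num [hgt, h1]
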